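-- pv_equiv track=rewrite | github.com/BCouble/app_purbeurre_project_5 | libs/controller/purbeurre/data_management.py | create_list_nutriscore
-- ===== SOURCE A (Python) =====
-- def create_list_nutriscore(l_nutriscore):
--     """create list nutriscore"""
--     value_nutriscore = ('a', 'b', 'c', 'd', 'e', 'f')
--     list_nutriscore = []
--     for value in value_nutriscore:
--         if value != l_nutriscore:
--             list_nutriscore.append(value)
--         if value == l_nutriscore:
--             list_nutriscore.append(value)
--             break
--
--     return list_nutriscore
-- ===== SOURCE B (Python) =====
-- def create_list_nutriscore(l_nutriscore):
--     """create list nutriscore"""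
--     values = ('a', 'b', 'c', 'd', 'e', 'f')
--     if l_nutriscore in values:
--         return list(values[:values.index(l_nutriscore) + 1])
--     return list(values)
-- ===== Notes on version B (the rewrite author's own statement) =====
-- stated objective: simpler
-- what changed: Replaces the scan-and-append loop with two branches and a break by a membership test plus index-and-slice: the whole accumulating loop disappears.
import Mathlib
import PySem

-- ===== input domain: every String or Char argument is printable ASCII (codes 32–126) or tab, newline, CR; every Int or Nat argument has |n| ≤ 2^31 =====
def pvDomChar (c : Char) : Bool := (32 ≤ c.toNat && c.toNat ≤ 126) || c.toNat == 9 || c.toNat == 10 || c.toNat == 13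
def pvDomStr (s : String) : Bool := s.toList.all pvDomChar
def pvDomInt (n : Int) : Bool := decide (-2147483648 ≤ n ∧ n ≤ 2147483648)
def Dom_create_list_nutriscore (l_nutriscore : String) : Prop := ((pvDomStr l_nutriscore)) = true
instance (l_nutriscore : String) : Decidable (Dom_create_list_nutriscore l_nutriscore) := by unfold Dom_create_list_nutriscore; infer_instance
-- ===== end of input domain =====

-- B replaces A's append-and-break loop by a membership test plus index-and-slice (objective: simpler).

-- ===== PORT A =====
-- A's loop with break, as structural recursion over the tuple's elements:
-- per iteration: if value ≠ l then append value and continue; if value = l then append value and stop.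
def create_list_nutriscore_loop (l_nutriscore : String) : List String → List String
  | [] => []
  | v :: rest =>
      if v ≠ l_nutriscore then v :: create_list_nutriscore_loop l_nutriscore rest
      else [v]

def create_list_nutriscore (l_nutriscore : String) : List String :=
  create_list_nutriscore_loop l_nutriscore ["a", "b", "c", "d", "e", "f"]

-- ===== PORT B =====
def create_list_nutriscore_alt (l_nutriscore : String) : List String :=
  let values : List String := ["a", "b", "c", "d", "e", "f"]
  if values.contains l_nutriscore then
    match PySem.List.index? values l_nutriscore with
    | some i => PySem.List.slice values none (some (i + 1))
    | none => values
  else values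

-- ===== PRECONDITION & SPEC =====
def Spec_create_list_nutriscore (l_nutriscore : String) (out : List String) : Prop := out = create_list_nutriscore_alt l_nutriscore
instance (l_nutriscore : String) (out : List String) : Decidable (Spec_create_list_nutriscore l_nutriscore out) := by unfold Spec_create_list_nutriscore; infer_instance

-- ===== CLAIM (what is proved, stated in full; the proofs are below) =====
def Claim_equal_create_list_nutriscore : Prop := ∀ (l_nutriscore : String), Dom_create_list_nutriscore l_nutriscore → Spec_create_list_nutriscore l_nutriscore (create_list_nutriscore l_nutriscore)

-- ===== LEMMAS AND PROOFS =====

-- ===== VERDICT (by name: the statement is the Claim_ definition above) =====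
theorem create_list_nutriscore_spec : Claim_equal_create_list_nutriscore := by
  intro s _
  unfold Spec_create_list_nutriscore create_list_nutriscore create_list_nutriscore_alt
  by_cases ha : s = "a" <;> by_cases hb : s = "b" <;> by_cases hc : s = "c" <;>
    by_cases hd : s = "d" <;> by_cases he : s = "e" <;> by_cases hf : s = "f" <;>
    simp_all [create_list_nutriscore_loop, PySem.List.index?, PySem.List.slice,
      PySem.List.clampIdx, eq_comm] <;> decide
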